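-- pv_equiv track=rewrite | github.com/rpmcruz/rank-classify | threshold.py | f
-- ===== SOURCE A (Python) =====
-- def f(index, current_label, labels, num_labels, dp_matrix, class_weight):
--     if index >= len(labels) or current_label >= num_labels:
--         return 0
--
--     if dp_matrix[index][current_label] != -1:
--         return dp_matrix[index][current_label]
--
--     error = class_weight[labels[index]][current_label]
--
--     if current_label + 1 == num_labels:
--         dp_matrix[index][current_label] = \
--             error + \
--             f(index + 1, current_label, labels, num_labels, dp_matrix, class_weight)
--     else:
--         dp_matrix[index][current_label] = \
--             min(error +
--                 f(index + 1, current_label, labels, num_labels, dp_matrix, class_weight),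
--                 f(index, current_label + 1, labels, num_labels, dp_matrix, class_weight))
--     return dp_matrix[index][current_label]
-- ===== SOURCE B (Python) =====
-- def f(index, current_label, labels, num_labels, dp_matrix, class_weight):
--     n = len(labels)
--     if index >= n or current_label >= num_labels:
--         return 0
--     root = dp_matrix[index][current_label]
--     if root != -1:
--         return root
--
--     val = {}
--
--     def get(i, c):
--         if i >= n or c >= num_labels:
--             return 0
--         return val[(i, c)]
--
--     for i in range(n - 1, index - 1, -1):
--         for c in range(num_labels - 1, current_label - 1, -1):
--             seeded = dp_matrix[i][c]
--             if seeded != -1: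
--                 val[(i, c)] = seeded
--             else:
--                 e = class_weight[labels[i]][c]
--                 cand = e + get(i + 1, c)
--                 if c + 1 != num_labels:
--                     cand = min(cand, get(i, c + 1))
--                 val[(i, c)] = cand
--     return val[(index, current_label)]
-- ===== Notes on version B (the rewrite author's own statement) =====
-- stated objective: alternative
-- what changed: Replaces the top-down memoized recursion (which mutates dp_matrix) with a bottom-up iterative DP: two explicit descending loops fill a fresh dictionary over exactly the rectangle [index,n)x[current_label,num_labels), respecting pre-seeded (!=-1) cells per cell; A's in-place memo writes to dp_matrix are not performed by B (return-value equivalence).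
-- outside the precondition, e.g. on f(-1, 0, [0, 0], 2, [[-1, -1], [-1, -1]], [[1, 1]]): A returns 1, B returns 3; on f(0, 0, [0, 9], 2, [[-1, 5], [7, -1]], [[1, 1]]): A returns 5, B raises IndexError
import Mathlib
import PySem

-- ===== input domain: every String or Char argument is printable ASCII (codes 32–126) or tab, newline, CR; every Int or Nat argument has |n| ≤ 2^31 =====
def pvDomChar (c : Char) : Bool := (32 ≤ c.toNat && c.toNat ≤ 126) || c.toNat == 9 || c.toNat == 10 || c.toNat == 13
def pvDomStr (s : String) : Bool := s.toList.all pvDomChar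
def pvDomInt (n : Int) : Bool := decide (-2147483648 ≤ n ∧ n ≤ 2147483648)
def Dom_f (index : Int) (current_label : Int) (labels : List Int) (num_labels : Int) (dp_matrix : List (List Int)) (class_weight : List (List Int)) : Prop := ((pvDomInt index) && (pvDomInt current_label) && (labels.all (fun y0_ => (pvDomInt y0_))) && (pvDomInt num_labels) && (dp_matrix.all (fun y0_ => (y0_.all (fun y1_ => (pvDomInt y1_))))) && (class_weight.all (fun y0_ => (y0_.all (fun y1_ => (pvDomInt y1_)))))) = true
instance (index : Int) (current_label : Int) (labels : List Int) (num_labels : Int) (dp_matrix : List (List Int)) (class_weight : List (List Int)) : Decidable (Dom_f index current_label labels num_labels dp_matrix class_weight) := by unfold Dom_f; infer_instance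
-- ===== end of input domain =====

-- B replaces A's top-down memoized recursion by a bottom-up iterative DP over the same cells;
-- A mutates dp_matrix in place, B does not: the equivalence proved here is about the RETURN value only.

-- ===== PORT A =====
-- m[i][c] read (Python raises when out of range; on Pre_ all reads are in range, the default is never used)
def pvCell (m : List (List Int)) (i c : Int) : Int :=
  PySem.List.pyGetD (PySem.List.pyGetD m i []) c 0

-- dp_matrix[i][c] = v  (on Pre_ the write is in range; out of range pySetD is the identity)
def pvSetCell (m : List (List Int)) (i c : Int) (v : Int) : List (List Int) :=
  PySem.List.pySetD m i (PySem.List.pySetD (PySem.List.pyGetD m i []) c v)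

-- state-passing transliteration of A: the Int result together with the mutated dp_matrix.
-- Structural recursion on a fuel argument; fA passes fuel exceeding the recursion depth,
-- so the fuel-0 branch is never reached and each step is exactly A's body.
def fAgo (fuel : Nat) (index current_label : Int) (labels : List Int) (num_labels : Int)
    (dp : List (List Int)) (cw : List (List Int)) : Int × List (List Int) :=
  match fuel with
  | 0 => (0, dp)
  | fuel + 1 =>
    if (labels.length : Int) ≤ index ∨ num_labels ≤ current_label then (0, dp)
    else
      let cur := pvCell dp index current_label
      if cur ≠ -1 then (cur, dp)
      else
        let error := pvCell cw (PySem.List.pyGetD labels index 0) current_label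
        if current_label + 1 = num_labels then
          let r := fAgo fuel (index + 1) current_label labels num_labels dp cw
          (error + r.1, pvSetCell r.2 index current_label (error + r.1))
        else
          let r1 := fAgo fuel (index + 1) current_label labels num_labels dp cw
          let r2 := fAgo fuel index (current_label + 1) labels num_labels r1.2 cw
          let v := min (error + r1.1) r2.1
          (v, pvSetCell r2.2 index current_label v)

def fA (index current_label : Int) (labels : List Int) (num_labels : Int)
    (dp : List (List Int)) (cw : List (List Int)) : Int × List (List Int) :=
  fAgo (((labels.length : Int) - index).toNat + (num_labels - current_label).toNat + 1)
    index current_label labels num_labels dp cw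

def f (index : Int) (current_label : Int) (labels : List Int) (num_labels : Int) (dp_matrix : List (List Int)) (class_weight : List (List Int)) : Int :=
  (fA index current_label labels num_labels dp_matrix class_weight).1

-- ===== PORT B =====
-- the inner function `get` of Source B
def pvGetV (n num : Int) (val : PySem.Dict (Int × Int) Int) (i c : Int) : Int :=
  if n ≤ i ∨ num ≤ c then 0 else val.getD (i, c) 0
-- body of the inner `for c` loop of Source B (val[(i,c)] read via getD: on Pre_ the key is always present)
def pvCellStep (labels : List Int) (num : Int) (cw dp : List (List Int)) (i : Int)
    (val : PySem.Dict (Int × Int) Int) (c : Int) : PySem.Dict (Int × Int) Int :=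
  let seeded := pvCell dp i c
  if seeded ≠ -1 then val.insert (i, c) seeded
  else
    let e := pvCell cw (PySem.List.pyGetD labels i 0) c
    let cand := e + pvGetV (labels.length : Int) num val (i + 1) c
    let cand := if c + 1 ≠ num then min cand (pvGetV (labels.length : Int) num val i (c + 1)) else cand
    val.insert (i, c) cand
-- body of the outer `for i` loop of Source B
def pvRowStep (labels : List Int) (num : Int) (cw dp : List (List Int)) (cl : Int)
    (val : PySem.Dict (Int × Int) Int) (i : Int) : PySem.Dict (Int × Int) Int :=
  (PySem.List.pyRange (num - 1) (cl - 1) (-1)).foldl (pvCellStep labels num cw dp i) val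

def f_alt (index : Int) (current_label : Int) (labels : List Int) (num_labels : Int) (dp_matrix : List (List Int)) (class_weight : List (List Int)) : Int :=
  let n : Int := labels.length
  if n ≤ index ∨ num_labels ≤ current_label then 0
  else
    let root := pvCell dp_matrix index current_label
    if root ≠ -1 then root
    else
      let val := (PySem.List.pyRange (n - 1) (index - 1) (-1)).foldl
        (pvRowStep labels num_labels class_weight dp_matrix current_label) PySem.Dict.empty
      val.getD (index, current_label) 0

-- ===== PRECONDITION & SPEC =====
-- the shapes on which A's recursion raises no IndexError
def pvShape (labels : List Int) (num_labels : Int) (dp cw : List (List Int)) : Prop :=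
  dp.length = labels.length ∧ (∀ row ∈ dp, num_labels ≤ (row.length : Int)) ∧
  (∀ l ∈ labels, 0 ≤ l ∧ l < (cw.length : Int)) ∧ (∀ row ∈ cw, num_labels ≤ (row.length : Int))

-- Pre_ excludes negative index/current_label (Python's negative-index wraparound aliases dp_matrix
-- rows, so A's result there is an artefact of its mutation order) and mis-shaped inputs (short rows,
-- out-of-range label values), on which A usually raises IndexError and otherwise returns a value that
-- depends on which cells its pruned recursion happens to touch; it keeps every in-shape input, every
-- immediate out-of-range return and every immediate memo hit.
def Pre_f (index : Int) (current_label : Int) (labels : List Int) (num_labels : Int) (dp_matrix : List (List Int)) (class_weight : List (List Int)) : Prop :=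
  0 ≤ index ∧ 0 ≤ current_label ∧
  ((labels.length : Int) ≤ index ∨ num_labels ≤ current_label ∨
   (PySem.List.pyGet? (PySem.List.pyGetD dp_matrix index []) current_label ≠ none ∧
    (PySem.List.pyGet? (PySem.List.pyGetD dp_matrix index []) current_label).getD 0 ≠ -1) ∨
   pvShape labels num_labels dp_matrix class_weight)

instance (index : Int) (current_label : Int) (labels : List Int) (num_labels : Int) (dp_matrix : List (List Int)) (class_weight : List (List Int)) : Decidable (Pre_f index current_label labels num_labels dp_matrix class_weight) := by unfold Pre_f pvShape; infer_instance

def pvWitness_f : Int × Int × List Int × Int × List (List Int) × List (List Int) :=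
  (0, 0, [0, 1], 2, [[-1, -1], [-1, -1]], [[1, 0], [0, 1]])

def Spec_f (index : Int) (current_label : Int) (labels : List Int) (num_labels : Int) (dp_matrix : List (List Int)) (class_weight : List (List Int)) (out : Int) : Prop := out = f_alt index current_label labels num_labels dp_matrix class_weight
instance (index : Int) (current_label : Int) (labels : List Int) (num_labels : Int) (dp_matrix : List (List Int)) (class_weight : List (List Int)) (out : Int) : Decidable (Spec_f index current_label labels num_labels dp_matrix class_weight out) := by unfold Spec_f; infer_instance

-- ===== CLAIM (what is proved, stated in full; the proofs are below) =====
def Claim_equal_f : Prop := ∀ (index : Int) (current_label : Int) (labels : List Int) (num_labels : Int) (dp_matrix : List (List Int)) (class_weight : List (List Int)), Dom_f index current_label labels num_labels dp_matrix class_weight → Pre_f index current_label labels num_labels dp_matrix class_weight → Spec_f index current_label labels num_labels dp_matrix class_weight (f index current_label labels num_labels dp_matrix class_weight)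

-- ===== LEMMAS AND PROOFS =====

-- the pure cell value both programs compute (recursion over the ORIGINAL dp)
def pvV (index current_label : Int) (labels : List Int) (num_labels : Int)
    (dp cw : List (List Int)) : Int :=
  if (labels.length : Int) ≤ index ∨ num_labels ≤ current_label then 0
  else if pvCell dp index current_label ≠ -1 then pvCell dp index current_label
  else
    let e := pvCell cw (PySem.List.pyGetD labels index 0) current_label
    if current_label + 1 = num_labels then
      e + pvV (index + 1) current_label labels num_labels dp cw
    else
      min (e + pvV (index + 1) current_label labels num_labels dp cw)
          (pvV index (current_label + 1) labels num_labels dp cw)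
termination_by ((labels.length - index).toNat, (num_labels - current_label).toNat)
decreasing_by all_goals omega

theorem pyGetD_nonneg {α : Type} (xs : List α) (i : Int) (d : α) (h : 0 ≤ i) :
    PySem.List.pyGetD xs i d = xs.getD i.toNat d := by
  have := PySem.List.pyGetD_natCast (xs := xs) (n := i.toNat) (d := d)
  rwa [Int.toNat_of_nonneg h] at this

theorem pvCell_nonneg (m : List (List Int)) (i c : Int) (hi : 0 ≤ i) (hc : 0 ≤ c) :
    pvCell m i c = (m.getD i.toNat []).getD c.toNat 0 := by
  rw [pvCell, pyGetD_nonneg _ _ _ hi, pyGetD_nonneg _ _ _ hc]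

theorem pvSetCell_nonneg (m : List (List Int)) (i c : Int) (v : Int) (hi : 0 ≤ i) (hc : 0 ≤ c) :
    pvSetCell m i c v = m.set i.toNat ((m.getD i.toNat []).set c.toNat v) := by
  rw [pvSetCell, pyGetD_nonneg _ _ _ hi, PySem.List.pySetD_of_nonneg _ _ hc,
    PySem.List.pySetD_of_nonneg _ _ hi]

theorem pvSetCell_length (m : List (List Int)) (i c v : Int) (hi : 0 ≤ i) (hc : 0 ≤ c) :
    (pvSetCell m i c v).length = m.length := by
  rw [pvSetCell_nonneg _ _ _ _ hi hc]; simp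

theorem pvSetCell_rowlen (m : List (List Int)) (i c v : Int) (hi : 0 ≤ i) (hc : 0 ≤ c) (j : Nat) :
    ((pvSetCell m i c v).getD j []).length = (m.getD j []).length := by
  rw [pvSetCell_nonneg _ _ _ _ hi hc]
  by_cases hj : j = i.toNat
  · subst hj
    by_cases hlt : i.toNat < m.length
    · simp [List.getD, hlt]
    · simp [List.getD, hlt]
  · simp [List.getD, Ne.symm hj]

theorem pvCell_pvSetCell (m : List (List Int)) (i c i' c' v : Int)
    (hi : 0 ≤ i) (hc : 0 ≤ c) (hi' : 0 ≤ i') (hc' : 0 ≤ c') :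
    pvCell (pvSetCell m i c v) i' c' = pvCell m i' c' ∨
      (i' = i ∧ c' = c ∧ pvCell (pvSetCell m i c v) i' c' = v) := by
  rw [pvSetCell_nonneg _ _ _ _ hi hc, pvCell_nonneg _ _ _ hi' hc', pvCell_nonneg _ _ _ hi' hc']
  by_cases hrow : i'.toNat = i.toNat
  · by_cases hlt : i.toNat < m.length
    · rw [hrow]
      have hget : (m.set i.toNat ((m.getD i.toNat []).set c.toNat v)).getD i.toNat [] =
          (m.getD i.toNat []).set c.toNat v := by
        simp [List.getD, hlt]
      rw [hget]
      by_cases hcol : c'.toNat = c.toNat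
      · by_cases hclt : c.toNat < (m.getD i.toNat []).length
        · right
          refine ⟨by omega, by omega, ?_⟩
          have hclt' : c.toNat < (m[i.toNat]?.getD []).length := by simpa [List.getD] using hclt
          rw [hcol]; simp [List.getD, hclt']
        · left; rw [hcol]
          have hclt' : ¬ c.toNat < (m[i.toNat]?.getD []).length := by simpa [List.getD] using hclt
          simp [List.getD, hclt']
      · left; simp [List.getD, Ne.symm hcol]
    · left
      have : m.set i.toNat ((m.getD i.toNat []).set c.toNat v) = m := by
        apply List.set_eq_of_length_le; omega
      rw [this]
  · left
    have : (m.set i.toNat ((m.getD i.toNat []).set c.toNat v)).getD i'.toNat [] =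
        m.getD i'.toNat [] := by
      simp [List.getD, Ne.symm hrow]
    rw [this]
def pvInv (labels : List Int) (num : Int) (dp0 cw dp' : List (List Int)) : Prop :=
  dp'.length = dp0.length ∧
  (∀ j : Nat, (dp'.getD j []).length = (dp0.getD j []).length) ∧
  (∀ i c : Int, 0 ≤ i → 0 ≤ c →
    pvCell dp' i c = pvCell dp0 i c ∨ pvCell dp' i c = pvV i c labels num dp0 cw)

theorem fAgo_eq_pvV (labels : List Int) (num : Int) (cw dp0 : List (List Int)) :
    ∀ (fuel : Nat) (index cl : Int) (dp' : List (List Int)), 0 ≤ index → 0 ≤ cl →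
      ((labels.length : Int) - index).toNat + (num - cl).toNat < fuel →
      pvInv labels num dp0 cw dp' →
      (fAgo fuel index cl labels num dp' cw).1 = pvV index cl labels num dp0 cw ∧
      pvInv labels num dp0 cw (fAgo fuel index cl labels num dp' cw).2 := by
  intro fuel
  induction fuel with
  | zero => intro index cl dp' hi hc hfuel hInv; omega
  | succ fuel ih =>
    intro index cl dp' hi hc hfuel hInv
    by_cases hg : (labels.length : Int) ≤ index ∨ num ≤ cl
    · rw [fAgo, if_pos hg, pvV, if_pos hg]
      exact ⟨rfl, hInv⟩
    · by_cases hcur' : pvCell dp' index cl ≠ -1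
      · have hfa : fAgo (fuel + 1) index cl labels num dp' cw = (pvCell dp' index cl, dp') := by
          rw [fAgo, if_neg hg, if_pos hcur']
        rw [hfa]
        refine ⟨?_, hInv⟩
        rcases hInv.2.2 index cl hi hc with h | h
        · have hd0 : pvCell dp0 index cl ≠ -1 := by rw [← h]; exact hcur'
          rw [pvV, if_neg hg, if_pos hd0]
          exact h
        · exact h
      · push Not at hcur'
        have hd0 : pvCell dp0 index cl = -1 := by
          rcases hInv.2.2 index cl hi hc with h | h
          · rw [← h]; exact hcur'
          · by_contra hne'
            rw [pvV, if_neg hg, if_pos hne'] at h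
            rw [h] at hcur'; exact hne' hcur'
        by_cases heq : cl + 1 = num
        · obtain ⟨ihv, ihInv⟩ := ih (index + 1) cl dp' (by omega) hc (by omega) hInv
          set e := pvCell cw (PySem.List.pyGetD labels index 0) cl with he
          set v := e + (fAgo fuel (index + 1) cl labels num dp' cw).1 with hv
          have hfa : fAgo (fuel + 1) index cl labels num dp' cw =
              (v, pvSetCell (fAgo fuel (index + 1) cl labels num dp' cw).2 index cl v) := by
            rw [fAgo, if_neg hg, if_neg (by simp [hcur']), if_pos heq]
          have hV : pvV index cl labels num dp0 cw = e + pvV (index + 1) cl labels num dp0 cw := by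
            rw [pvV, if_neg hg]
            simp [hd0, heq, he]
          have hvv : v = pvV index cl labels num dp0 cw := by rw [hv, ihv, hV]
          rw [hfa]
          refine ⟨hvv, ?_, ?_, ?_⟩
          · rw [pvSetCell_length _ _ _ _ hi hc]; exact ihInv.1
          · intro j; rw [pvSetCell_rowlen _ _ _ _ hi hc]; exact ihInv.2.1 j
          · intro i c hi' hc'
            rcases pvCell_pvSetCell (fAgo fuel (index + 1) cl labels num dp' cw).2 index cl i c v hi hc hi' hc' with h | ⟨h1, h2, h3⟩
            · rw [h]; exact ihInv.2.2 i c hi' hc'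
            · right; rw [h3, hvv, h1, h2]
        · obtain ⟨ihv1, ihInv1⟩ := ih (index + 1) cl dp' (by omega) hc (by omega) hInv
          obtain ⟨ihv2, ihInv2⟩ := ih index (cl + 1)
            (fAgo fuel (index + 1) cl labels num dp' cw).2 hi (by omega) (by omega) ihInv1
          set e := pvCell cw (PySem.List.pyGetD labels index 0) cl with he
          set v := min (e + (fAgo fuel (index + 1) cl labels num dp' cw).1)
            (fAgo fuel index (cl + 1) labels num (fAgo fuel (index + 1) cl labels num dp' cw).2 cw).1 with hv
          have hfa : fAgo (fuel + 1) index cl labels num dp' cw =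
              (v, pvSetCell
                (fAgo fuel index (cl + 1) labels num (fAgo fuel (index + 1) cl labels num dp' cw).2 cw).2
                index cl v) := by
            rw [fAgo, if_neg hg, if_neg (by simp [hcur']), if_neg heq]
          have hV : pvV index cl labels num dp0 cw =
              min (e + pvV (index + 1) cl labels num dp0 cw) (pvV index (cl + 1) labels num dp0 cw) := by
            rw [pvV, if_neg hg]
            simp [hd0, heq, he]
          have hvv : v = pvV index cl labels num dp0 cw := by rw [hv, ihv1, ihv2, hV]
          rw [hfa]
          refine ⟨hvv, ?_, ?_, ?_⟩
          · rw [pvSetCell_length _ _ _ _ hi hc]; exact ihInv2.1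
          · intro j; rw [pvSetCell_rowlen _ _ _ _ hi hc]; exact ihInv2.2.1 j
          · intro i c hi' hc'
            rcases pvCell_pvSetCell _ index cl i c v hi hc hi' hc' with h | ⟨h1, h2, h3⟩
            · rw [h]; exact ihInv2.2.2 i c hi' hc'
            · right; rw [h3, hvv, h1, h2]

theorem fA_eq_pvV (labels : List Int) (num : Int) (cw dp0 : List (List Int))
    (index cl : Int) (dp' : List (List Int)) (hi : 0 ≤ index) (hc : 0 ≤ cl)
    (hInv : pvInv labels num dp0 cw dp') :
    (fA index cl labels num dp' cw).1 = pvV index cl labels num dp0 cw ∧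
      pvInv labels num dp0 cw (fA index cl labels num dp' cw).2 := by
  exact fAgo_eq_pvV labels num cw dp0 _ index cl dp' hi hc (by omega) hInv

theorem pvInner (labels : List Int) (num : Int) (cw dp : List (List Int)) (cl i : Int)
    (hin : i < (labels.length : Int)) :
    ∀ (k : Nat) (a : Int) (val : PySem.Dict (Int × Int) Int), (a - (cl - 1)).toNat = k →
      a < num →
      (∀ i' c' : Int, i < i' → i' < (labels.length : Int) → cl ≤ c' → c' < num →
        val.getD (i', c') 0 = pvV i' c' labels num dp cw) →
      (∀ c' : Int, a < c' → c' < num →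
        val.getD (i, c') 0 = pvV i c' labels num dp cw) →
      (∀ i' c' : Int, i < i' → i' < (labels.length : Int) → cl ≤ c' → c' < num →
        ((PySem.List.pyRange a (cl - 1) (-1)).foldl (pvCellStep labels num cw dp i) val).getD (i', c') 0
          = pvV i' c' labels num dp cw) ∧
      (∀ c' : Int, cl - 1 < c' → c' < num →
        ((PySem.List.pyRange a (cl - 1) (-1)).foldl (pvCellStep labels num cw dp i) val).getD (i, c') 0
          = pvV i c' labels num dp cw) := by
  intro k
  induction k using Nat.strong_induction_on with
  | _ k IH =>
    intro a val hk ha hrows hrow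
    by_cases hend : a ≤ cl - 1
    · rw [PySem.List.pyRange_neg_one_eq_nil hend]
      simp only [List.foldl_nil]
      exact ⟨hrows, fun c' h1 h2 => hrow c' (by omega) h2⟩
    · push Not at hend
      rw [PySem.List.pyRange_neg_one_cons hend, List.foldl_cons]
      have hstep : ∀ i' c' : Int, ¬ (i' = i ∧ c' = a) →
          (pvCellStep labels num cw dp i val a).getD (i', c') 0 = val.getD (i', c') 0 := by
        intro i' c' hne
        rw [pvCellStep]
        split
        · rw [PySem.Dict.getD_insert]
          rw [if_neg (by simpa [Prod.ext_iff] using hne)]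
        · rw [PySem.Dict.getD_insert]
          rw [if_neg (by simpa [Prod.ext_iff] using hne)]
      have hstepa : (pvCellStep labels num cw dp i val a).getD (i, a) 0 =
          pvV i a labels num dp cw := by
        rw [pvCellStep]
        have hg : ¬ ((labels.length : Int) ≤ i ∨ num ≤ a) := by omega
        split
        · rename_i hseed
          rw [PySem.Dict.getD_insert, if_pos rfl, pvV, if_neg hg, if_pos hseed]
        · rename_i hseed
          have hseed' : pvCell dp i a = -1 := by simpa using hseed
          rw [PySem.Dict.getD_insert, if_pos rfl, pvV, if_neg hg]
          simp only [hseed', ne_eq, not_true_eq_false, if_false]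
          have hget1 : pvGetV (labels.length : Int) num val (i + 1) a =
              pvV (i + 1) a labels num dp cw := by
            rw [pvGetV]
            by_cases hi1 : (labels.length : Int) ≤ i + 1
            · rw [if_pos (Or.inl hi1), pvV, if_pos (Or.inl hi1)]
            · push Not at hi1
              rw [if_neg (by omega)]
              exact hrows (i + 1) a (by omega) hi1 (by omega) ha
          by_cases hlast : a + 1 = num
          · rw [if_pos hlast, if_neg (by omega), hget1]
          · have hget2 : pvGetV (labels.length : Int) num val i (a + 1) =
                pvV i (a + 1) labels num dp cw := by
              rw [pvGetV, if_neg (by omega)]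
              exact hrow (a + 1) (by omega) (by omega)
            rw [if_neg hlast, if_pos (by omega), hget1, hget2]
      refine IH (k - 1) (by omega) (a - 1) _ (by omega) (by omega) ?_ ?_
      · intro i' c' h1 h2 h3 h4
        rw [hstep i' c' (by omega)]
        exact hrows i' c' h1 h2 h3 h4
      · intro c' h1 h2
        by_cases hca : c' = a
        · subst hca; exact hstepa
        · rw [hstep i c' (by simp [hca])]
          exact hrow c' (by omega) h2
theorem pvOuter (labels : List Int) (num : Int) (cw dp : List (List Int)) (index cl : Int) :
    ∀ (k : Nat) (b : Int) (val : PySem.Dict (Int × Int) Int), (b - (index - 1)).toNat = k →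
      b < (labels.length : Int) →
      (∀ i' c' : Int, b < i' → i' < (labels.length : Int) → cl ≤ c' → c' < num →
        val.getD (i', c') 0 = pvV i' c' labels num dp cw) →
      (∀ i' c' : Int, index - 1 < i' → i' < (labels.length : Int) → cl ≤ c' → c' < num →
        ((PySem.List.pyRange b (index - 1) (-1)).foldl
            (pvRowStep labels num cw dp cl) val).getD (i', c') 0
          = pvV i' c' labels num dp cw) := by
  intro k
  induction k using Nat.strong_induction_on with
  | _ k IH =>
    intro b val hk hb hrows
    by_cases hend : b ≤ index - 1
    · rw [PySem.List.pyRange_neg_one_eq_nil hend]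
      simp only [List.foldl_nil]
      intro i' c' h1 h2 h3 h4
      exact hrows i' c' (by omega) h2 h3 h4
    · push Not at hend
      rw [PySem.List.pyRange_neg_one_cons hend, List.foldl_cons]
      obtain ⟨hAbove, hRowb⟩ := pvInner labels num cw dp cl b hb
        (num - 1 - (cl - 1)).toNat (num - 1) val rfl (by omega) hrows
        (fun c' h1 h2 => by omega)
      intro i' c' h1 h2 h3 h4
      refine IH (k - 1) (by omega) (b - 1) _ (by omega) (by omega) ?_ i' c' h1 h2 h3 h4
      intro i'' c'' g1 g2 g3 g4
      by_cases hib : i'' = b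
      · subst hib
        exact hRowb c'' (by omega) g4
      · exact hAbove i'' c'' (by omega) g2 g3 g4

theorem f_alt_eq_pvV (index cl : Int) (labels : List Int) (num : Int)
    (dp cw : List (List Int)) :
    f_alt index cl labels num dp cw = pvV index cl labels num dp cw := by
  rw [f_alt]
  by_cases hg : (labels.length : Int) ≤ index ∨ num ≤ cl
  · rw [if_pos hg, pvV, if_pos hg]
  · rw [if_neg hg]
    push Not at hg
    by_cases hroot : pvCell dp index cl ≠ -1
    · rw [if_pos hroot, pvV, if_neg (by omega), if_pos hroot]
    · rw [if_neg hroot]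
      have := pvOuter labels num cw dp index cl
        ((labels.length : Int) - 1 - (index - 1)).toNat ((labels.length : Int) - 1)
        PySem.Dict.empty rfl (by omega) (fun i' c' h1 h2 h3 h4 => by omega)
      exact this index cl (by omega) (by omega) le_rfl (by omega)

-- ===== VERDICT (by name: the statement is the Claim_ definition above) =====
theorem f_spec : Claim_equal_f := by
  intro index current_label labels num_labels dp_matrix class_weight hdom hpre
  obtain ⟨hi, hc, -⟩ := hpre
  unfold Spec_f f
  rw [f_alt_eq_pvV]
  exact (fA_eq_pvV labels num_labels class_weight dp_matrix index current_label dp_matrix hi hc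
    ⟨rfl, fun _ => rfl, fun _ _ _ _ => Or.inl rfl⟩).1
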